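-- pv_equiv track=rewrite | github.com/Z3tty/AdventOfCode2022 | day6/day6.py | message_find_start
-- ===== SOURCE A (Python) =====
-- def unique(s: str) -> bool:
--     b: list = []
--     for c in s:
--         if c in b:
--             return False
--         b.append(c)
--     return True
--
-- def message_find_start(stream: str) -> int:
--     i = 0
--     while i < len(stream) - 14:
--         test_string: str = stream[i:i+14]
--         if (unique(test_string)):
--             return i+14
--         i += 1
--     return -1
-- ===== SOURCE B (Python) =====
-- def message_find_start(stream: str) -> int:
--     # Single-pass sliding window: last_seen[c] = most recent index of c,
--     # start = left edge of the longest duplicate-free window ending at the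
--     # current character.  Returns end+1 at the first window of 14 distinct chars.
--     last_seen = {}
--     start = 0
--     for end, c in enumerate(stream):
--         prev = last_seen.get(c, -1)
--         if prev >= start:
--             start = prev + 1
--         last_seen[c] = end
--         if end - start + 1 == 14:
--             return end + 1
--     return -1
-- ===== Notes on version B (the rewrite author's own statement) =====
-- stated objective: faster
-- what changed: Replaced the restart-every-window scan (each of up to n windows re-checked by a quadratic uniqueness loop) with a single-pass two-pointer sliding window keeping a last-seen-index dict; B also examines the final window, which A's off-by-one loop bound skips, stated as the intended difference D_.
-- intended difference: On streams whose only 14-distinct-character window is the final one (first unique window starts at len-14), A returns -1 because its loop bound 'i < len(stream) - 14' never tests the last window, while B returns len(stream), the intended end index of that window. — e.g. on message_find_start("abcdefghijklmn"): A returns -1, B returns 14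
import Mathlib
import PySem

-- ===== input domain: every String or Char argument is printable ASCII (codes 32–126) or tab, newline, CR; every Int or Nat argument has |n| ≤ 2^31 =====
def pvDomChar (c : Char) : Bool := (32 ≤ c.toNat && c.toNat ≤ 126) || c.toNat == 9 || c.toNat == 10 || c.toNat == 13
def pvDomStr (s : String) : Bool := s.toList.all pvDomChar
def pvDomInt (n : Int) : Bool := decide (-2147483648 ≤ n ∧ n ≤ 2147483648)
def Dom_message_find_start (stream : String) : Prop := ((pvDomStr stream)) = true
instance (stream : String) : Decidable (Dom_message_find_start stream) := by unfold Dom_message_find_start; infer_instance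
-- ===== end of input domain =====

-- B replaces A's restart-per-window scan by a one-pass two-pointer sliding window
-- (last-seen dict); B also checks the final window that A's loop bound skips (see D_).

-- ===== PORT A =====
-- helper 'unique': list b of seen chars, return False on first repeat
def pvUniqueGo (cs : List Char) (b : List Char) : Bool :=
  match cs with
  | [] => true
  | c :: rest => if c ∈ b then false else pvUniqueGo rest (b ++ [c])

def pvUnique (s : List Char) : Bool := pvUniqueGo s []

-- the while loop: i counts up while i < len(stream) - 14; fuel = remaining iterations
def pvMfsGo (cs : List Char) (i : Nat) (fuel : Nat) : Int :=
  match fuel with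
  | 0 => -1
  | f + 1 =>
    if pvUnique (PySem.List.slice cs (some (i : Int)) (some ((i : Int) + 14))) then
      (i : Int) + 14
    else
      pvMfsGo cs (i + 1) f

def message_find_start (stream : String) : Int :=
  pvMfsGo stream.toList 0 (stream.toList.length - 14)

-- ===== PORT B =====
-- the for loop over enumerate(stream): last_seen dict, window left edge 'start'
def pvAltGo (pairs : List (Int × Char)) (lastSeen : PySem.Dict Char Int) (start : Int) : Int :=
  match pairs with
  | [] => -1
  | (e, c) :: rest =>
    let prev := lastSeen.getD c (-1)
    let start' := if prev ≥ start then prev + 1 else start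
    let lastSeen' := lastSeen.insert c e
    if e - start' + 1 = 14 then e + 1 else pvAltGo rest lastSeen' start'

def message_find_start_alt (stream : String) : Int :=
  pvAltGo (PySem.List.enumerate stream.toList 0) PySem.Dict.empty 0

-- ===== PRECONDITION & SPEC =====
-- On streams whose only 14-distinct-char window is the final one, A returns -1 (its loop
-- bound 'i < len - 14' never tests the last window) while B returns len(stream), the
-- intended end index of that window.
def D_message_find_start (stream : String) : Prop :=
  14 ≤ stream.toList.length ∧
  (stream.toList.drop (stream.toList.length - 14)).Nodup ∧
  ∀ i < stream.toList.length - 14, ¬ ((stream.toList.drop i).take 14).Nodup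
instance (stream : String) : Decidable (D_message_find_start stream) := by
  unfold D_message_find_start; infer_instance

def Spec_message_find_start (stream : String) (out : Int) : Prop :=
  ¬ D_message_find_start stream → out = message_find_start_alt stream
instance (stream : String) (out : Int) : Decidable (Spec_message_find_start stream out) := by
  unfold Spec_message_find_start; infer_instance

def pvDiffWitness_message_find_start : String := "abcdefghijklmn"
def pvDiffWitnessOut_message_find_start : Int × Int := (-1, 14)

-- ===== CLAIM (what is proved, stated in full; the proofs are below) =====
def Claim_unchanged_message_find_start : Prop :=
  ∀ (stream : String), Dom_message_find_start stream →
    Spec_message_find_start stream (message_find_start stream)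
def Claim_changed_message_find_start : Prop :=
  Dom_message_find_start (pvDiffWitness_message_find_start) ∧
  D_message_find_start (pvDiffWitness_message_find_start) ∧
  message_find_start (pvDiffWitness_message_find_start) = pvDiffWitnessOut_message_find_start.1 ∧
  message_find_start_alt (pvDiffWitness_message_find_start) = pvDiffWitnessOut_message_find_start.2 ∧
  pvDiffWitnessOut_message_find_start.1 ≠ pvDiffWitnessOut_message_find_start.2
def Claim_exact_message_find_start : Prop :=
  ∀ (stream : String), Dom_message_find_start stream → D_message_find_start stream →
    message_find_start stream ≠ message_find_start_alt stream

-- ===== LEMMAS AND PROOFS =====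

-- window [s, k) of cs
def pvWin (cs : List Char) (s k : Nat) : List Char := (cs.drop s).take (k - s)
abbrev pvOk (cs : List Char) (s k : Nat) : Prop := (pvWin cs s k).Nodup

lemma pvOk_self (cs : List Char) (k : Nat) : pvOk cs k k := by
  simp [pvOk, pvWin]

lemma pvS_ex (cs : List Char) (k : Nat) : ∃ s, pvOk cs s k := ⟨k, pvOk_self cs k⟩

-- minimal left edge of a duplicate-free window ending (exclusively) at k
def pvS (cs : List Char) (k : Nat) : Nat := Nat.find (pvS_ex cs k)

lemma pvS_spec (cs : List Char) (k : Nat) : pvOk cs (pvS cs k) k := Nat.find_spec (pvS_ex cs k)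

lemma pvS_min (cs : List Char) (k : Nat) {s : Nat} (h : s < pvS cs k) : ¬ pvOk cs s k :=
  Nat.find_min (pvS_ex cs k) h

lemma pvS_le (cs : List Char) (k : Nat) : pvS cs k ≤ k :=
  Nat.find_le (pvOk_self cs k)

lemma pvOk_mono (cs : List Char) {s s' k : Nat} (hss : s ≤ s') (h : pvOk cs s k) :
    pvOk cs s' k := by
  have hw : pvWin cs s' k = (pvWin cs s k).drop (s' - s) := by
    rw [pvWin, pvWin, List.drop_take, List.drop_drop,
      show s + (s' - s) = s' from by omega, show k - s - (s' - s) = k - s' from by omega]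
  rw [pvOk, hw]
  exact h.sublist (List.drop_sublist _ _)

lemma pvOk_iff (cs : List Char) (s k : Nat) : pvOk cs s k ↔ pvS cs k ≤ s := by
  constructor
  · intro h; by_contra hlt; exact pvS_min cs k (by omega) h
  · intro h; exact pvOk_mono cs h (pvS_spec cs k)

lemma pvS_zero (cs : List Char) : pvS cs 0 = 0 := by
  have := pvS_le cs 0; omega

lemma pvWin_succ (cs : List Char) {s k : Nat} (hs : s ≤ k) (hk : k < cs.length) :
    pvWin cs s (k + 1) = pvWin cs s k ++ [cs[k]] := by
  rw [pvWin, pvWin, show k + 1 - s = (k - s) + 1 from by omega, List.take_add_one]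
  congr 1
  rw [List.getElem?_drop, show s + (k - s) = k from by omega,
    List.getElem?_eq_getElem hk]
  rfl

lemma pvWin_length (cs : List Char) (s k : Nat) :
    (pvWin cs s k).length = min (k - s) (cs.length - s) := by
  simp [pvWin]

lemma pvMem_win_iff (cs : List Char) (s k : Nat) (c : Char) (hk : k ≤ cs.length) :
    c ∈ pvWin cs s k ↔ ∃ j, s ≤ j ∧ j < k ∧ cs[j]? = some c := by
  constructor
  · intro h
    rw [List.mem_iff_getElem] at h
    obtain ⟨m, hm, hget⟩ := h
    have hlen := pvWin_length cs s k
    have hsm : s + m < cs.length := by omega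
    refine ⟨s + m, by omega, by omega, ?_⟩
    have hv : (pvWin cs s k)[m]'hm = cs[s + m]'hsm := by
      simp only [pvWin, List.getElem_take, List.getElem_drop]
    rw [List.getElem?_eq_getElem hsm, ← hget, hv]
  · rintro ⟨j, hsj, hjk, hget⟩
    have hj : j < cs.length := by
      by_contra hge
      rw [List.getElem?_eq_none (by omega)] at hget
      cases hget
    have hc : cs[j] = c := by
      rw [List.getElem?_eq_getElem hj] at hget
      exact Option.some.inj hget
    rw [List.mem_iff_getElem]
    have hlen := pvWin_length cs s k
    refine ⟨j - s, by omega, ?_⟩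
    simp only [pvWin, List.getElem_take, List.getElem_drop]
    have hix : cs[s + (j - s)]'(by omega) = cs[j]'hj := by
      congr 1
      omega
    rw [hix]
    exact hc

-- the i-indexed window condition of A, and the shared find-based shape
def pvP (cs : List Char) (i : Nat) : Bool := decide (pvOk cs i (i + 14))

def pvF (cs : List Char) (m : Nat) : Int :=
  match (List.range m).find? (pvP cs) with
  | some i => (i : Int) + 14
  | none => -1

-- ===== A-side characterization =====

lemma pvUniqueGo_eq (cs : List Char) : ∀ b : List Char, b.Nodup →
    pvUniqueGo cs b = decide (b ++ cs).Nodup := by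
  induction cs with
  | nil => intro b hb; simp [pvUniqueGo, hb]
  | cons c rest ih =>
    intro b hb
    by_cases hc : c ∈ b
    · have hnd : ¬ (b ++ c :: rest).Nodup := by
        rw [List.nodup_append]
        rintro ⟨-, -, hdisj⟩
        exact hdisj c hc c (by simp) rfl
      simp [pvUniqueGo, hc, hnd]
    · have hb' : (b ++ [c]).Nodup := by
        rw [List.nodup_append]
        refine ⟨hb, List.nodup_singleton c, ?_⟩
        intro a ha b' hb''
        simp only [List.mem_singleton] at hb''
        subst hb''
        exact fun h => hc (h ▸ ha)
      rw [List.append_cons]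
      simp [pvUniqueGo, hc, ih (b ++ [c]) hb']

lemma pvUnique_eq (s : List Char) : pvUnique s = decide s.Nodup := by
  simpa using pvUniqueGo_eq s [] (by simp)

lemma pvSlice_eq_win (cs : List Char) (i : Nat) :
    PySem.List.slice cs (some (i : Int)) (some ((i : Int) + 14)) = pvWin cs i (i + 14) := by
  have h14 : ((i : Int) + 14) = ((i + 14 : Nat) : Int) := by push_cast; ring
  rw [h14, PySem.List.slice_natCast]
  simp [pvWin]

lemma pvMfsGo_eq (cs : List Char) : ∀ fuel i, pvMfsGo cs i fuel =
    (match (List.range fuel).find? (fun k => pvP cs (i + k)) with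
     | some k => (i : Int) + (k : Int) + 14
     | none => -1) := by
  intro fuel
  induction fuel with
  | zero => intro i; simp [pvMfsGo]
  | succ f ih =>
    intro i
    rw [List.range_succ_eq_map]
    simp only [pvMfsGo, pvSlice_eq_win, pvUnique_eq]
    by_cases hnd : (pvWin cs i (i + 14)).Nodup
    · rw [List.find?_cons_of_pos (by simp [pvP, pvOk, hnd])]
      simp [hnd]
    · rw [List.find?_cons_of_neg (by simp [pvP, pvOk, hnd])]
      rw [if_neg (by simpa using hnd)]
      have hcomp : ((fun k => pvP cs (i + k)) ∘ Nat.succ) = (fun k => pvP cs (i + 1 + k)) := by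
        funext k
        simp only [Function.comp]
        congr 1
        omega
      rw [ih (i + 1), List.find?_map, hcomp]
      cases hfind : (List.range f).find? (fun k => pvP cs (i + 1 + k)) with
      | none => simp
      | some k =>
        simp only [Option.map_some]
        push_cast
        ring

lemma pvA_eq (cs : List Char) :
    pvMfsGo cs 0 (cs.length - 14) = pvF cs (cs.length - 14) := by
  rw [pvMfsGo_eq, pvF]
  have h0 : (fun k => pvP cs (0 + k)) = pvP cs := by
    funext k
    simp
  rw [h0]
  cases hfind : (List.range (cs.length - 14)).find? (pvP cs) with
  | none => simp
  | some k => simp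

-- ===== B-side characterization =====

-- B fires at position e when the 14-window ending at e is duplicate-free
def pvFire (cs : List Char) (e : Nat) : Bool := decide (13 ≤ e ∧ pvOk cs (e - 13) (e + 1))

def pvG (cs : List Char) (k : Nat) : Int :=
  match (List.range' k (cs.length - k)).find? (pvFire cs) with
  | some e => (e : Int) + 1
  | none => -1

-- dict invariant: lastSeen.getD c (-1) is the last index of c among the first k chars
def pvDictInv (cs : List Char) (k : Nat) (d : PySem.Dict Char Int) : Prop :=
  ∀ c : Char, -1 ≤ d.getD c (-1) ∧ d.getD c (-1) < (k : Int) ∧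
    (0 ≤ d.getD c (-1) → cs[(d.getD c (-1)).toNat]? = some c) ∧
    (∀ j : Nat, j < k → cs[j]? = some c → (j : Int) ≤ d.getD c (-1))

-- step: the minimal left edge at k+1 is max of the one at k and (last occurrence of cs[k]) + 1
lemma pvS_succ (cs : List Char) (k : Nat) (hk : k < cs.length) (d : PySem.Dict Char Int)
    (hd : pvDictInv cs k d) (prev : Int) (hprev : prev = d.getD cs[k] (-1)) :
    (pvS cs (k + 1) : Int) = max (pvS cs k : Int) (prev + 1) := by
  obtain ⟨hm1, hltk, hat, hlast⟩ := hd cs[k]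
  rw [← hprev] at hm1 hltk hat hlast
  have key : ∀ s : Nat, pvOk cs s (k + 1) ↔ (pvOk cs s k ∧ prev < (s : Int)) := by
    intro s
    by_cases hsk : s ≤ k
    · rw [pvOk, pvWin_succ cs hsk hk, List.nodup_append]
      constructor
      · rintro ⟨h1, -, h2⟩
        refine ⟨h1, ?_⟩
        by_contra hle
        push Not at hle
        have hprev0 : 0 ≤ prev := le_trans (by omega) hle
        have hatp := hat hprev0
        have hmem : cs[k] ∈ pvWin cs s k := by
          rw [pvMem_win_iff cs s k _ (by omega)]
          exact ⟨prev.toNat, by omega, by omega, hatp⟩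
        exact h2 cs[k] hmem cs[k] (by simp) rfl
      · rintro ⟨h1, h2⟩
        refine ⟨h1, List.nodup_singleton _, ?_⟩
        intro a hmem b hb
        simp only [List.mem_singleton] at hb
        subst hb
        rw [pvMem_win_iff cs s k _ (by omega)] at hmem
        obtain ⟨j, hsj, hjk, hget⟩ := hmem
        intro haeq
        rw [haeq] at hget
        have := hlast j hjk hget
        omega
    · have e1 : k + 1 - s = 0 := by omega
      have e2 : k - s = 0 := by omega
      simp only [pvOk, pvWin, e1, e2, List.take_zero, List.nodup_nil, true_iff, true_and]
      omega
  have h2 := (key (pvS cs (k + 1))).mp (pvS_spec cs (k + 1))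
  have hge : (pvS cs k : Int) ≤ (pvS cs (k + 1) : Int) := by
    exact_mod_cast (pvOk_iff cs _ k).mp h2.1
  have hge2 : prev + 1 ≤ (pvS cs (k + 1) : Int) := by
    have := h2.2
    omega
  have hmaxok : pvOk cs (max (pvS cs k) (prev + 1).toNat) (k + 1) := by
    rw [key]
    constructor
    · exact pvOk_mono cs (Nat.le_max_left _ _) (pvS_spec cs k)
    · have h := Nat.le_max_right (pvS cs k) (prev + 1).toNat
      omega
  have hle : pvS cs (k + 1) ≤ max (pvS cs k) (prev + 1).toNat := by
    by_contra hgt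
    exact pvS_min cs (k + 1) (by omega) hmaxok
  have hM1 := Nat.le_max_left (pvS cs k) (prev + 1).toNat
  have hM2 := Nat.le_max_right (pvS cs k) (prev + 1).toNat
  omega

-- the main loop invariant
lemma pvAltGo_spec (cs : List Char) : ∀ k, ∀ (d : PySem.Dict Char Int) (start : Int),
    k ≤ cs.length →
    pvDictInv cs k d →
    start = (pvS cs k : Int) →
    k ≤ pvS cs k + 13 →
    pvAltGo (PySem.List.enumerate (cs.drop k) (k : Int)) d start = pvG cs k := by
  intro k
  induction hn : cs.length - k generalizing k with
  | zero =>
    intro d start hk hd hs hw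
    rw [List.drop_eq_nil_of_le (by omega), pvG, hn]
    simp [pvAltGo, PySem.List.enumerate]
  | succ m ih =>
    intro d start hk hd hs hw
    have hklt : k < cs.length := by omega
    rw [List.drop_eq_getElem_cons hklt, PySem.List.enumerate_cons]
    simp only [pvAltGo]
    set c := cs[k] with hc
    set prev := d.getD c (-1) with hprev
    have hstep := pvS_succ cs k hklt d hd prev hprev
    have hstart' : (if prev ≥ start then prev + 1 else start) = ((pvS cs (k + 1) : Nat) : Int) := by
      rw [hs]
      split_ifs with hge <;> omega
    rw [hstart']
    have hSmono : (pvS cs k : Int) ≤ ((pvS cs (k + 1) : Nat) : Int) := by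
      rw [hstep]; exact le_max_left _ _
    have hSle : pvS cs (k + 1) ≤ k + 1 := pvS_le cs (k + 1)
    have hfire_iff : ((k : Int) - ((pvS cs (k + 1) : Nat) : Int) + 1 = 14) ↔ pvFire cs k = true := by
      simp only [pvFire, decide_eq_true_eq]
      constructor
      · intro h
        have h13 : 13 ≤ k := by omega
        have hS : pvS cs (k + 1) = k - 13 := by omega
        exact ⟨h13, by rw [← hS]; exact pvS_spec cs (k + 1)⟩
      · rintro ⟨h13, hok⟩
        have := (pvOk_iff cs _ _).mp hok
        omega
    have hrange : List.range' k (cs.length - k) = k :: List.range' (k + 1) (cs.length - (k + 1)) := by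
      rw [show cs.length - k = (cs.length - (k + 1)) + 1 from by omega, List.range'_succ]
    by_cases hfire : pvFire cs k = true
    · rw [if_pos (hfire_iff.mpr hfire)]
      rw [pvG, hrange, List.find?_cons_of_pos hfire]
    · rw [if_neg (fun h => hfire (hfire_iff.mp h))]
      -- new dict invariant
      have hd' : pvDictInv cs (k + 1) (d.insert c (k : Int)) := by
        intro c'
        by_cases hcc : c' = c
        · subst hcc
          rw [PySem.Dict.getD_insert_self]
          refine ⟨by omega, by omega, ?_, ?_⟩
          · intro h
            simp only [Int.toNat_natCast]
            rw [List.getElem?_eq_getElem hklt]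
          · intro j hj hget
            obtain ⟨h1, h2, h3, h4⟩ := hd c
            by_cases hjk : j < k
            · have := h4 j hjk hget
              omega
            · omega
        · rw [PySem.Dict.getD_insert_of_ne d _ _ hcc]
          obtain ⟨h1, h2, h3, h4⟩ := hd c'
          refine ⟨h1, by omega, h3, ?_⟩
          intro j hj hget
          by_cases hjk : j < k
          · exact h4 j hjk hget
          · have hjeq : j = k := by omega
            subst hjeq
            rw [List.getElem?_eq_getElem hklt] at hget
            exact absurd (Option.some.inj hget).symm hcc
      have hw' : k + 1 ≤ pvS cs (k + 1) + 13 := by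
        simp only [pvFire, decide_eq_true_eq] at hfire
        by_cases h13 : 13 ≤ k
        · have hnok : ¬ pvOk cs (k - 13) (k + 1) := fun h => hfire ⟨h13, h⟩
          have : ¬ (pvS cs (k + 1) ≤ k - 13) :=
            fun h => hnok (pvOk_mono cs h (pvS_spec cs (k + 1)))
          omega
        · omega
      have hrec := ih (k + 1) (by omega) (d.insert c (k : Int)) ((pvS cs (k + 1) : Nat) : Int)
        (by omega) hd' rfl hw'
      rw [show (k : Int) + 1 = ((k + 1 : Nat) : Int) from by push_cast; ring, hrec]
      rw [pvG, pvG, hrange, List.find?_cons_of_neg (by simpa using hfire)]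

lemma pvDictInv_empty (cs : List Char) : pvDictInv cs 0 (PySem.Dict.empty) := by
  intro c
  rw [PySem.Dict.getD_empty]
  refine ⟨by omega, by omega, by omega, by omega⟩

lemma pvB_eq_G (s : String) : message_find_start_alt s = pvG s.toList 0 := by
  rw [message_find_start_alt]
  have := pvAltGo_spec s.toList 0 PySem.Dict.empty 0 (by omega) (pvDictInv_empty s.toList)
    (by rw [pvS_zero]; simp) (by rw [pvS_zero]; omega)
  simpa using this

-- translate the fire-indexed find to the window-indexed find: e = i + 13
lemma pvG_eq_F (cs : List Char) : pvG cs 0 = pvF cs (cs.length - 13) := by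
  rw [pvG, pvF]
  simp only [Nat.sub_zero]
  by_cases hn : cs.length ≤ 13
  · have h1 : (List.range' 0 cs.length).find? (pvFire cs) = none := by
      rw [List.find?_eq_none]
      intro e he
      rw [List.mem_range'_1] at he
      simp only [pvFire, decide_eq_true_eq]
      rintro ⟨h13, -⟩
      omega
    rw [h1, show cs.length - 13 = 0 from by omega]
    simp
  · push Not at hn
    have hsplit := List.range'_append (s := 0) (m := 13) (n := cs.length - 13) (step := 1)
    rw [show (13 : Nat) + (cs.length - 13) = cs.length from by omega] at hsplit
    norm_num at hsplit
    rw [← hsplit, List.find?_append]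
    have h1 : (List.range' 0 13).find? (pvFire cs) = none := by
      rw [List.find?_eq_none]
      intro e he
      rw [List.mem_range'_1] at he
      simp only [pvFire, decide_eq_true_eq]
      rintro ⟨h13, -⟩
      omega
    rw [h1, Option.none_or]
    have hmap : List.range' 13 (cs.length - 13) =
        (List.range (cs.length - 13)).map (fun x => 13 + x) := by
      rw [List.range_eq_range', List.map_add_range']
    rw [hmap, List.find?_map]
    have hcomp : (pvFire cs ∘ fun x => 13 + x) = pvP cs := by
      funext i
      simp only [Function.comp, pvFire, pvP]
      rw [show 13 + i - 13 = i from by omega, show 13 + i + 1 = i + 14 from by omega,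
        decide_eq_decide]
      exact ⟨fun h => h.2, fun h => ⟨by omega, h⟩⟩
    rw [hcomp]
    cases hfind : (List.range (cs.length - 13)).find? (pvP cs) with
    | none => simp
    | some i =>
      simp only [Option.map_some]
      push_cast
      ring

-- outside D_, the extra window B checks does not matter
lemma pvF_agree (cs : List Char)
    (hD : ¬ (14 ≤ cs.length ∧ (cs.drop (cs.length - 14)).Nodup ∧
      ∀ i < cs.length - 14, ¬ ((cs.drop i).take 14).Nodup)) :
    pvF cs (cs.length - 14) = pvF cs (cs.length - 13) := by
  by_cases hn : cs.length < 14
  · congr 1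
    omega
  · push Not at hn
    have hsplit : List.range (cs.length - 13) = List.range (cs.length - 14) ++ [cs.length - 14] := by
      rw [show cs.length - 13 = (cs.length - 14) + 1 from by omega, List.range_succ]
    rw [pvF, pvF, hsplit, List.find?_append]
    cases hfind : (List.range (cs.length - 14)).find? (pvP cs) with
    | some i => simp
    | none =>
      simp only [Option.none_or]
      have hall : ∀ i < cs.length - 14, ¬ ((cs.drop i).take 14).Nodup := by
        intro i hi
        have := List.find?_eq_none.mp hfind i (by simpa [List.mem_range] using hi)
        simpa [pvP, pvOk, pvWin, show i + 14 - i = 14 from by omega] using this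
      have hlast : ¬ (cs.drop (cs.length - 14)).Nodup := fun h => hD ⟨hn, h, hall⟩
      have hP : pvP cs (cs.length - 14) = false := by
        simp only [pvP, decide_eq_false_iff_not, pvOk, pvWin]
        rw [show cs.length - 14 + 14 - (cs.length - 14) = 14 from by omega,
          List.take_of_length_le (by rw [List.length_drop]; omega)]
        exact hlast
      simp [hP]

lemma pvNoneBelow (cs : List Char)
    (hD : ∀ i < cs.length - 14, ¬ ((cs.drop i).take 14).Nodup) :
    (List.range (cs.length - 14)).find? (pvP cs) = none := by
  rw [List.find?_eq_none]
  intro i hi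
  rw [List.mem_range] at hi
  have := hD i hi
  simpa [pvP, pvOk, pvWin, show i + 14 - i = 14 from by omega] using this

-- inside D_, A misses the final window (returns -1) …
lemma pvF_D_A (cs : List Char)
    (hD : ∀ i < cs.length - 14, ¬ ((cs.drop i).take 14).Nodup) :
    pvF cs (cs.length - 14) = -1 := by
  rw [pvF, pvNoneBelow cs hD]

-- … and B returns the length of the stream
lemma pvF_D_B (cs : List Char) (h14 : 14 ≤ cs.length)
    (hlast : (cs.drop (cs.length - 14)).Nodup)
    (hD : ∀ i < cs.length - 14, ¬ ((cs.drop i).take 14).Nodup) :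
    pvF cs (cs.length - 13) = (cs.length : Int) := by
  rw [pvF]
  rw [show cs.length - 13 = (cs.length - 14) + 1 from by omega, List.range_succ,
    List.find?_append, pvNoneBelow cs hD, Option.none_or]
  have hlastP : pvP cs (cs.length - 14) = true := by
    simp only [pvP, decide_eq_true_eq, pvOk, pvWin]
    rw [show cs.length - 14 + 14 - (cs.length - 14) = 14 from by omega,
      List.take_of_length_le (by rw [List.length_drop]; omega)]
    exact hlast
  rw [List.find?_cons_of_pos hlastP]
  simp only []
  omega

-- ===== VERDICT (by name: the statement is the Claim_ definition above) =====
theorem message_find_start_spec : Claim_unchanged_message_find_start := by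
  intro stream _ hD
  rw [message_find_start, pvA_eq, pvB_eq_G, pvG_eq_F]
  exact pvF_agree stream.toList hD

theorem message_find_start_changed : Claim_changed_message_find_start := by
  unfold Claim_changed_message_find_start
  decide

theorem message_find_start_tight : Claim_exact_message_find_start := by
  intro stream _ hD
  obtain ⟨h14, hlast, hall⟩ := hD
  rw [message_find_start, pvA_eq, pvB_eq_G, pvG_eq_F]
  rw [pvF_D_A stream.toList hall, pvF_D_B stream.toList h14 hlast hall]
  omega
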